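-- pv_equiv track=rewrite | github.com/fang-xiaoyu/CS61A | lab/lab05.py | add_chars
-- ===== SOURCE A (Python) =====
-- def add_chars(w1, w2):
--     """
--     Return a string containing the characters you need to add to w1 to get w2.
--
--     You may assume that w1 is a subsequence of w2.
--
--     >>> add_chars("owl", "howl")
--     'h'
--     >>> add_chars("want", "wanton")
--     'on'
--     >>> add_chars("rat", "radiate")
--     'diae'
--     >>> add_chars("a", "prepare")
--     'prepre'
--     >>> add_chars("resin", "recursion")
--     'curo'
--     >>> add_chars("fin", "effusion")
--     'efuso'
--     >>> add_chars("coy", "cacophony")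
--     'acphon'
--     >>> from construct_check import check
--     >>> check(LAB_SOURCE_FILE, 'add_chars',
--     ...       ['For', 'While', 'Set', 'SetComp']) # Must use recursion
--     True
--     """
--     "*** YOUR CODE HERE ***"
--     if w1 == '' and w2 != '':
--         return w2
--     elif w1 == '' and w2 == '':
--         return ''
--     elif w1[0] == w2[0]:
--         return add_chars(w1[1:], w2[1:])
--     else:
--         return w2[0] + add_chars(w1, w2[1:])
-- ===== SOURCE B (Python) =====
-- def add_chars(w1, w2):
--     i = 0
--     out = []
--     for c in w2:
--         if i < len(w1) and c == w1[i]: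
--             i += 1
--         else:
--             out.append(c)
--     return ''.join(out)
-- ===== Notes on version B (the rewrite author's own statement) =====
-- stated objective: faster
-- what changed: Replaced A's string-slicing recursion (each step copies suffixes of both strings) by a single iterative pass over w2 with an index pointer into w1, accumulating the added characters in a list and joining once.
import Mathlib
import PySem

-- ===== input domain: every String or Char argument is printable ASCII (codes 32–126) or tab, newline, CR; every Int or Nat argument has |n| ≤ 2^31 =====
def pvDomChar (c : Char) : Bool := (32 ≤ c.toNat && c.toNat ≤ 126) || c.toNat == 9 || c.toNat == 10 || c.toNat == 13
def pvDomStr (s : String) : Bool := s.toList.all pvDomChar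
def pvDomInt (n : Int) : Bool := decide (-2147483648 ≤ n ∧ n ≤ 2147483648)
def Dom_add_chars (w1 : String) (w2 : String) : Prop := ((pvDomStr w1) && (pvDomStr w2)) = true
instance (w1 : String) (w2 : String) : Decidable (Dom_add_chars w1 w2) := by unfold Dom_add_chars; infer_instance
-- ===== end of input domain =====

-- B replaces A's string-slicing recursion with a single indexed pass over w2 (asymptotically faster; return value only).


-- ===== PORT A =====
-- Literal recursion of A on the character lists; `none` marks the IndexError
-- A hits (`w2[0]` with w2 empty but w1 nonempty).
def addCharsRecA : List Char → List Char → Option (List Char)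
  | [], w2 => if w2 ≠ [] then some w2 else some []
  | _ :: _, [] => none          -- Python: w1[0] == w2[0] raises IndexError on w2[0]
  | a :: as, b :: bs =>
      if a = b then addCharsRecA as bs
      else (addCharsRecA (a :: as) bs).map (fun r => b :: r)

def add_chars (w1 : String) (w2 : String) : String :=
  String.mk ((addCharsRecA w1.toList w2.toList).getD [])

-- ===== PORT B =====
-- One step of B's for-loop: state (i, out); Python `if i < len(w1) and c == w1[i]`.
def bStep (l1 : List Char) (st : Nat × List Char) (c : Char) : Nat × List Char :=
  match l1[st.1]? with
  | some a => if c = a then (st.1 + 1, st.2) else (st.1, st.2 ++ [c])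
  | none => (st.1, st.2 ++ [c])

def add_chars_alt (w1 : String) (w2 : String) : String :=
  String.mk (w2.toList.foldl (bStep w1.toList) (0, [])).2

-- ===== PRECONDITION & SPEC =====
-- Pre_ excludes exactly the inputs where A raises IndexError: those where w1 is
-- not a subsequence of w2 (the docstring's stated assumption).
def Pre_add_chars (w1 : String) (w2 : String) : Prop := w1.toList.Sublist w2.toList
instance (w1 : String) (w2 : String) : Decidable (Pre_add_chars w1 w2) := by unfold Pre_add_chars; infer_instance

def pvWitness_add_chars : String × String := ("fin", "effusion")

def Spec_add_chars (w1 : String) (w2 : String) (out : String) : Prop := out = add_chars_alt w1 w2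
instance (w1 : String) (w2 : String) (out : String) : Decidable (Spec_add_chars w1 w2 out) := by unfold Spec_add_chars; infer_instance

-- ===== CLAIM (what is proved, stated in full; the proofs are below) =====
def Claim_equal_add_chars : Prop := ∀ (w1 : String) (w2 : String), Dom_add_chars w1 w2 → Pre_add_chars w1 w2 → Spec_add_chars w1 w2 (add_chars w1 w2)

-- ===== LEMMAS AND PROOFS =====

theorem addCharsRecA_nil (w2 : List Char) : addCharsRecA [] w2 = some w2 := by
  cases w2 <;> simp [addCharsRecA]

-- A's recursion succeeds on subsequences.
theorem addCharsRecA_isSome : ∀ (w2 w1 : List Char), w1.Sublist w2 → (addCharsRecA w1 w2).isSome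
  | w2, [], _ => by simp [addCharsRecA_nil]
  | [], a :: as, h => by simp at h
  | b :: bs, a :: as, h => by
      by_cases hab : a = b
      · subst hab
        have has : as.Sublist bs := by simpa using h
        simpa [addCharsRecA] using addCharsRecA_isSome bs as has
      · have h' : (a :: as).Sublist bs := by
          cases h with
          | cons _ h => exact h
          | cons₂ _ h => exact absurd rfl hab
        simpa [addCharsRecA, hab] using addCharsRecA_isSome bs (a :: as) h'

-- Main invariant: B's fold starting at index i with accumulator `out` appends
-- exactly A's recursion applied to the remaining suffix l1.drop i.
theorem fold_eq_rec : ∀ (w2 l1 : List Char) (i : Nat) (out : List Char),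
    (l1.drop i).Sublist w2 →
    (w2.foldl (bStep l1) (i, out)).2 = out ++ (addCharsRecA (l1.drop i) w2).getD []
  | [], l1, i, out, h => by
      have hd : l1.drop i = [] := List.sublist_nil.mp h
      simp [hd, addCharsRecA_nil]
  | c :: cs, l1, i, out, h => by
      cases hd : l1.drop i with
      | nil =>
          have hge : l1.length ≤ i := by
            by_contra hlt
            push_neg at hlt
            have := List.length_drop (l := l1) (i := i)
            rw [hd] at this
            simp at this
            omega
          have hidx : l1[i]? = none := by
            simpa using List.getElem?_eq_none hge
          have hstep : bStep l1 (i, out) c = (i, out ++ [c]) := by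
            simp [bStep, hidx]
          have ih := fold_eq_rec cs l1 i (out ++ [c]) (by simp [hd])
          rw [hd] at ih
          simp [List.foldl_cons, hstep, ih, addCharsRecA_nil]
      | cons a as =>
          have hidx : l1[i]? = some a := by
            have := List.head?_drop (l := l1) (i := i)
            rw [hd] at this
            simpa using this.symm
          have hdrop1 : l1.drop (i + 1) = as := by
            have : l1.drop (i + 1) = (l1.drop i).tail := by
              rw [← List.drop_drop]
              simp
            rw [this, hd]
            rfl
          rw [hd] at h
          by_cases hca : c = a
          · subst hca
            have has : as.Sublist cs := by simpa using h
            have hstep : bStep l1 (i, out) c = (i + 1, out) := by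
              simp [bStep, hidx]
            have ih := fold_eq_rec cs l1 (i + 1) out (by rw [hdrop1]; exact has)
            rw [hdrop1] at ih
            simp [List.foldl_cons, hstep, ih, addCharsRecA]
          · have hac : ¬ a = c := fun e => hca e.symm
            have h' : (a :: as).Sublist cs := by
              cases h with
              | cons _ h => exact h
              | cons₂ _ h => exact absurd rfl hac
            have hstep : bStep l1 (i, out) c = (i, out ++ [c]) := by
              simp [bStep, hidx, hca]
            have ih := fold_eq_rec cs l1 i (out ++ [c]) (by rw [hd]; exact h')
            rw [hd] at ih
            obtain ⟨r, hr⟩ := Option.isSome_iff_exists.mp (addCharsRecA_isSome cs (a :: as) h')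
            simp [List.foldl_cons, hstep, ih, addCharsRecA, hac, hr]

-- ===== VERDICT (by name: the statement is the Claim_ definition above) =====
theorem add_chars_spec : Claim_equal_add_chars := by
  intro w1 w2 _ hpre
  unfold Spec_add_chars add_chars add_chars_alt
  have := fold_eq_rec w2.toList w1.toList 0 [] (by simpa using hpre)
  simp at this
  rw [this]
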